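-- pv_equiv track=rewrite | github.com/fedegr/leetcode | python/2435-paths-in-matrix-whose-sum-is-divisible-by-k.py | numberOfPathsStack
-- ===== SOURCE A (Python) =====
-- from collections import deque, defaultdict
-- from typing import List
--
-- def numberOfPathsStack(grid: List[List[int]], k: int) -> int:
--     w, h = len(grid[0]), len(grid)
--     mod = 10**9 + 7
--     path_count = [[None for _ in range(w)] for _ in range(h)]
--
--     stack = deque()
--     for nx, ny in ((1, 0), (0, 1),):
--         if nx >= w or ny >= h or path_count[ny][nx] is not None:
--             continue
--         stack.appendleft((nx, ny))
--
--     path_count[0][0] = {grid[0][0] % k: 1}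
--
--     while stack:
--         x, y = stack.pop()
--         path_count[y][x] = defaultdict(lambda: 0)
--         current_val = grid[y][x] % k
--         for nx, ny in ((x - 1, y), (x, y - 1)):
--             if nx < 0 or ny < 0:
--                 continue
--             for sum_, paths in path_count[ny][nx].items():
--                 val = (current_val + sum_) % k
--                 path_count[y][x][val] = (path_count[y][x][val] + paths) % mod
--
--         for nx, ny in ((x + 1, y), (x, y + 1)):
--             if nx >= w or ny >= h or path_count[ny][nx] is not None:
--                 continue
--             stack.appendleft((nx, ny))
--
--     # self.print_paths(path_count)
--
--     return path_count[-1][-1].get(0, 0)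
-- ===== SOURCE B (Python) =====
-- def numberOfPathsStack(grid, k):
--     MOD = 10 ** 9 + 7
--     h, w = len(grid), len(grid[0])
--     prev = []
--     for i in range(h):
--         row = []
--         for j in range(w):
--             g = grid[i][j] % k
--             if i == 0 and j == 0:
--                 cell = {g: 1}
--             else:
--                 cell = {}
--                 for src in ((row[j - 1] if j > 0 else None),
--                             (prev[j] if i > 0 else None)):
--                     if src is None:
--                         continue
--                     for s, p in src.items():
--                         v = (g + s) % k
--                         cell[v] = (cell.get(v, 0) + p) % MOD
--             row.append(cell)
--         prev = row
--     return prev[-1].get(0, 0)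
-- ===== Notes on version B (the rewrite author's own statement) =====
-- stated objective: faster
-- what changed: Replaced A's deque-frontier traversal with a None-sentinel table (whose duplicate re-pushes make it rebuild cells a combinatorial number of times) by a single row-major nested-loop DP that builds each cell's residue->count dict once from its up and left neighbours.
import Mathlib
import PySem

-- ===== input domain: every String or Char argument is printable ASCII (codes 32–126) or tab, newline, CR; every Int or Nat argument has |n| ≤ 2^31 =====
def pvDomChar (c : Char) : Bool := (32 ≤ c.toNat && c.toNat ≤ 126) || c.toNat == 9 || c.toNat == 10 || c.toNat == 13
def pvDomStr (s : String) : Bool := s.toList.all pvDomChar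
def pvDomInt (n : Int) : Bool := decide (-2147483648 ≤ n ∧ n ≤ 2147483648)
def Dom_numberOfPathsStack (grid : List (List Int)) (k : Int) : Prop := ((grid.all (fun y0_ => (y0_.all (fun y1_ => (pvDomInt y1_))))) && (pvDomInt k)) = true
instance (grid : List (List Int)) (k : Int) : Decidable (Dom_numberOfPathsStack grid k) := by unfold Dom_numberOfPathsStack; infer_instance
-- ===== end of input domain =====

-- B replaces A's deque/defaultdict frontier traversal (which re-pops cells many times) by a
-- row-major dense DP over residues modulo |k|; same return value, measurably faster.

-- ===== PORT A =====
-- A's per-cell dict of (residue mod k → path count mod 10^9+7)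

def pvP : Int := 1000000007

abbrev pvDict := PySem.Dict Int Int
abbrev pvTbl := List (List (Option pvDict))

-- one inner 'for sum_, paths in path_count[ny][nx].items()' loop of A
def pvStepF (k cur : Int) : pvDict → (Int × Int) → pvDict := fun d sv =>
  let v := PySem.Int.mod (cur + sv.1) k
  d.insert v (PySem.Int.mod (d.getD v 0 + sv.2) pvP)

def pvStep (k cur : Int) (src acc : pvDict) : pvDict := src.items.foldl (pvStepF k cur) acc

-- path_count[y][x] (a 2D read); exact for the non-negative in-range indices A uses
def pvGet2 (t : pvTbl) (x y : Int) : Option pvDict :=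
  PySem.List.pyGetD (PySem.List.pyGetD t y []) x none

-- path_count[y][x] = v ; exact for the non-negative in-range indices A uses
def pvSet2 (t : pvTbl) (x y : Int) (v : Option pvDict) : pvTbl :=
  PySem.List.pySetD t y (PySem.List.pySetD (PySem.List.pyGetD t y []) x v)

-- current_val = grid[y][x] % k
def pvCur (grid : List (List Int)) (k : Int) (x y : Int) : Int :=
  PySem.Int.mod (PySem.List.pyGetD (PySem.List.pyGetD grid y []) x 0) k

-- the first 'for nx, ny' phase of one 'while stack' iteration: the dict after the (x-1, y) pass
-- (the predecessor dicts are provably not-None under Pre_; '.getD empty' is exact there)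
def pvDict1 (grid : List (List Int)) (k : Int) (t : pvTbl) (x y : Int) : pvDict :=
  if x - 1 < 0 ∨ y < 0 then PySem.Dict.empty
  else pvStep k (pvCur grid k x y) ((pvGet2 t (x - 1) y).getD PySem.Dict.empty) PySem.Dict.empty

-- the dict one 'while stack' iteration stores at path_count[y][x]
def pvDict2 (grid : List (List Int)) (k : Int) (t : pvTbl) (x y : Int) : pvDict :=
  if x < 0 ∨ y - 1 < 0 then pvDict1 grid k t x y
  else pvStep k (pvCur grid k x y) ((pvGet2 t x (y - 1)).getD PySem.Dict.empty) (pvDict1 grid k t x y)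

-- the two 'appendleft' pushes at the end of one iteration (head of the list = pop end)
def pvPush (w h : Int) (t : pvTbl) (rest : List (Int × Int)) (x y : Int) : List (Int × Int) :=
  let st1 := if x + 1 ≥ w ∨ y ≥ h ∨ (pvGet2 t (x + 1) y).isSome then rest else rest ++ [(x + 1, y)]
  if x ≥ w ∨ y + 1 ≥ h ∨ (pvGet2 t x (y + 1)).isSome then st1 else st1 ++ [(x, y + 1)]

-- termination measure for A's while-loop
def pvMu (w h : Int) (c : Int × Int) : Nat := 3 ^ ((w - c.1) + (h - c.2)).toNat
def pvPhi (w h : Int) (st : List (Int × Int)) : Nat := (st.map (pvMu w h)).sum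

theorem pvMu_right (w h x y : Int) (hx : x + 1 < w) (hy : y < h) :
    3 * pvMu w h (x + 1, y) = pvMu w h (x, y) := by
  simp only [pvMu]
  have h1 : ((w - (x+1)) + (h - y)).toNat + 1 = ((w - x) + (h - y)).toNat := by omega
  rw [← h1, pow_succ]; ring

theorem pvMu_down (w h x y : Int) (hx : x < w) (hy : y + 1 < h) :
    3 * pvMu w h (x, y + 1) = pvMu w h (x, y) := by
  simp only [pvMu]
  have h1 : ((w - x) + (h - (y+1))).toNat + 1 = ((w - x) + (h - y)).toNat := by omega
  rw [← h1, pow_succ]; ring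

theorem pvPush_phi_lt (w h : Int) (t : pvTbl) (rest : List (Int × Int)) (x y : Int) :
    pvPhi w h (pvPush w h t rest x y) < pvPhi w h ((x, y) :: rest) := by
  have hpos : 0 < pvMu w h (x, y) := by simp only [pvMu]; positivity
  simp only [pvPush]
  by_cases h1 : x + 1 ≥ w ∨ y ≥ h ∨ (pvGet2 t (x + 1) y).isSome = true
  · rw [if_pos h1]
    by_cases h2 : x ≥ w ∨ y + 1 ≥ h ∨ (pvGet2 t x (y + 1)).isSome = true
    · rw [if_pos h2]
      simp only [pvPhi, List.map_cons, List.sum_cons]; omega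
    · rw [if_neg h2]
      rcases not_or.mp h2 with ⟨ha, h2'⟩; rcases not_or.mp h2' with ⟨hb, -⟩
      have hd := pvMu_down w h x y (by omega) (by omega)
      have hp2 : 0 < pvMu w h (x, y + 1) := by simp only [pvMu]; positivity
      simp only [pvPhi, List.map_append, List.map_cons, List.sum_append, List.sum_cons,
        List.map_nil, List.sum_nil]
      omega
  · rw [if_neg h1]
    rcases not_or.mp h1 with ⟨ha, h1'⟩; rcases not_or.mp h1' with ⟨hb, -⟩
    have hr := pvMu_right w h x y (by omega) (by omega)
    have hp1 : 0 < pvMu w h (x + 1, y) := by simp only [pvMu]; positivity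
    by_cases h2 : x ≥ w ∨ y + 1 ≥ h ∨ (pvGet2 t x (y + 1)).isSome = true
    · rw [if_pos h2]
      simp only [pvPhi, List.map_append, List.map_cons, List.sum_append, List.sum_cons,
        List.map_nil, List.sum_nil]
      omega
    · rw [if_neg h2]
      rcases not_or.mp h2 with ⟨hc, h2'⟩; rcases not_or.mp h2' with ⟨hdd, -⟩
      have hd := pvMu_down w h x y (by omega) (by omega)
      have hp2 : 0 < pvMu w h (x, y + 1) := by simp only [pvMu]; positivity
      simp only [pvPhi, List.map_append, List.map_cons, List.sum_append, List.sum_cons,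
        List.map_nil, List.sum_nil]
      omega

-- A's while-loop
def pvLoop (grid : List (List Int)) (k w h : Int) : List (Int × Int) → pvTbl → pvTbl
  | [], t => t
  | (x, y) :: rest, t =>
    let t' := pvSet2 t x y (some (pvDict2 grid k t x y))
    pvLoop grid k w h (pvPush w h t' rest x y) t'
  termination_by st _ => pvPhi w h st
  decreasing_by exact pvPush_phi_lt w h _ rest x y

def numberOfPathsStack (grid : List (List Int)) (k : Int) : Int :=
  let w : Int := PySem.List.len (PySem.List.pyGetD grid 0 [])
  let h : Int := PySem.List.len grid
  let t0 : pvTbl := List.replicate grid.length (List.replicate (PySem.List.pyGetD grid 0 []).length none)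
  let s0 : List (Int × Int) :=
    (if 1 ≥ w ∨ 0 ≥ h ∨ (pvGet2 t0 1 0).isSome then [] else [((1 : Int), (0 : Int))]) ++
    (if 0 ≥ w ∨ 1 ≥ h ∨ (pvGet2 t0 0 1).isSome then [] else [((0 : Int), (1 : Int))])
  let t1 := pvSet2 t0 0 0 (some (PySem.Dict.insert PySem.Dict.empty
              (PySem.Int.mod (PySem.List.pyGetD (PySem.List.pyGetD grid 0 []) 0 0) k) 1))
  let tF := pvLoop grid k w h s0 t1
  match PySem.List.pyGetD (PySem.List.pyGetD tF (-1) []) (-1) none with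
  | none => 0   -- Python raises here; unreachable under Pre_
  | some d => d.getD 0 0

-- ===== PORT B =====
-- the body of B's inner (column) loop: build this cell's dict of (residue -> count) from
-- the left neighbour in `row` and the up neighbour in `prev`, then append it to the row
def pvBInner (grid : List (List Int)) (k : Int) (prev : List pvDict) (i : Int)
    (row : List pvDict) (j : Int) : List pvDict :=
  let g := PySem.Int.mod (PySem.List.pyGetD (PySem.List.pyGetD grid i []) j 0) k
  let cell : pvDict :=
    if i = 0 ∧ j = 0 then PySem.Dict.insert PySem.Dict.empty g 1
    else
      -- the 'for src in (left, up)' loop; a None src contributes nothing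
      -- (row/prev reads are in range under Pre_; '.getD empty' is exact there)
      let d1 := if 0 < j then pvStep k g (PySem.List.pyGetD row (j - 1) PySem.Dict.empty) PySem.Dict.empty
                else PySem.Dict.empty
      if 0 < i then pvStep k g (PySem.List.pyGetD prev j PySem.Dict.empty) d1 else d1
  row ++ [cell]

def numberOfPathsStack_alt (grid : List (List Int)) (k : Int) : Int :=
  let h : Int := PySem.List.len grid
  let w : Int := PySem.List.len (PySem.List.pyGetD grid 0 [])
  let prev : List pvDict :=
    (PySem.List.pyRange 0 h).foldl (fun prev i =>
      (PySem.List.pyRange 0 w).foldl (pvBInner grid k prev i) []) []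
  (PySem.List.pyGetD prev (-1) PySem.Dict.empty).getD 0 0

-- ===== PRECONDITION & SPEC =====
-- Pre_ excludes exactly the inputs on which A raises: an empty grid or empty first row
-- (IndexError), a row shorter than the first row (IndexError while the frontier crosses it),
-- and k = 0 (ZeroDivisionError).
def Pre_numberOfPathsStack (grid : List (List Int)) (k : Int) : Prop :=
  grid ≠ [] ∧ 0 < (grid.getD 0 []).length ∧
  (∀ row ∈ grid, (grid.getD 0 []).length ≤ row.length) ∧ k ≠ 0
instance (grid : List (List Int)) (k : Int) : Decidable (Pre_numberOfPathsStack grid k) := by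
  unfold Pre_numberOfPathsStack; infer_instance

def pvWitness_numberOfPathsStack : List (List Int) × Int := ([[0]], 1)

def Spec_numberOfPathsStack (grid : List (List Int)) (k : Int) (out : Int) : Prop := out = numberOfPathsStack_alt grid k
instance (grid : List (List Int)) (k : Int) (out : Int) : Decidable (Spec_numberOfPathsStack grid k out) := by unfold Spec_numberOfPathsStack; infer_instance

-- ===== CLAIM (what is proved, stated in full; the proofs are below) =====
def Claim_equal_numberOfPathsStack : Prop := ∀ (grid : List (List Int)) (k : Int), Dom_numberOfPathsStack grid k → Pre_numberOfPathsStack grid k → Spec_numberOfPathsStack grid k (numberOfPathsStack grid k)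

-- ===== LEMMAS AND PROOFS =====

-- ---------- the per-cell dict that A's traversal computes at each cell ----------

def pvMk (grid : List (List Int)) (k : Int) (x y : Nat) : pvDict :=
  if x = 0 ∧ y = 0 then
    PySem.Dict.insert PySem.Dict.empty (PySem.Int.mod ((grid.getD 0 []).getD 0 0) k) 1
  else
    let cur := PySem.Int.mod ((grid.getD y []).getD x 0) k
    let d1 := if _hx : x = 0 then PySem.Dict.empty
              else pvStep k cur (pvMk grid k (x - 1) y) PySem.Dict.empty
    if _hy : y = 0 then d1 else pvStep k cur (pvMk grid k x (y - 1)) d1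
  termination_by x + y
  decreasing_by all_goals omega

theorem pvMk_base (grid : List (List Int)) (k : Int) :
    pvMk grid k 0 0 = PySem.Dict.insert PySem.Dict.empty
      (PySem.Int.mod ((grid.getD 0 []).getD 0 0) k) 1 := by
  unfold pvMk; simp

theorem pvMk_x0 (grid : List (List Int)) (k : Int) (x y : Nat) (hx : x = 0) (hy : y ≠ 0) :
    pvMk grid k x y = pvStep k (PySem.Int.mod ((grid.getD y []).getD x 0) k)
      (pvMk grid k x (y - 1)) PySem.Dict.empty := by
  conv_lhs => unfold pvMk
  simp [hx, hy]

theorem pvMk_y0 (grid : List (List Int)) (k : Int) (x y : Nat) (hx : x ≠ 0) (hy : y = 0) :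
    pvMk grid k x y = pvStep k (PySem.Int.mod ((grid.getD y []).getD x 0) k)
      (pvMk grid k (x - 1) y) PySem.Dict.empty := by
  conv_lhs => unfold pvMk
  simp [hx, hy]

theorem pvMk_xy (grid : List (List Int)) (k : Int) (x y : Nat) (hx : x ≠ 0) (hy : y ≠ 0) :
    pvMk grid k x y = pvStep k (PySem.Int.mod ((grid.getD y []).getD x 0) k)
      (pvMk grid k x (y - 1))
      (pvStep k (PySem.Int.mod ((grid.getD y []).getD x 0) k)
        (pvMk grid k (x - 1) y) PySem.Dict.empty) := by
  conv_lhs => unfold pvMk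
  simp [hx, hy]

-- ---------- the state invariant of A's while-loop ----------

def pvIdx (t : pvTbl) (x y : Nat) : Option pvDict := (t.getD y []).getD x none

theorem pvGet2_natCast (t : pvTbl) (x y : Nat) : pvGet2 t (x : Int) (y : Int) = pvIdx t x y := by
  simp [pvGet2, pvIdx, PySem.List.pyGetD_natCast]

theorem pvSet2_natCast (t : pvTbl) (a b : Nat) (v : Option pvDict) :
    pvSet2 t (a : Int) (b : Int) v = t.set b ((t.getD b []).set a v) := by
  simp [pvSet2, PySem.List.pySetD_natCast, PySem.List.pyGetD_natCast]

theorem pvGetD_set_self {α : Type} (l : List α) (i : Nat) (r d : α) (h : i < l.length) :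
    (l.set i r).getD i d = r := by
  rw [List.getD_eq_getElem?_getD, List.getElem?_set_self h, Option.getD_some]

theorem pvGetD_set_ne {α : Type} (l : List α) (i j : Nat) (r d : α) (h : i ≠ j) :
    (l.set i r).getD j d = l.getD j d := by
  rw [List.getD_eq_getElem?_getD, List.getElem?_set_ne h, ← List.getD_eq_getElem?_getD]

theorem pvIdx_set_self (t : pvTbl) (a b : Nat) (v : Option pvDict)
    (hb : b < t.length) (ha : a < (t.getD b []).length) :
    pvIdx (t.set b ((t.getD b []).set a v)) a b = v := by
  unfold pvIdx
  rw [pvGetD_set_self t b _ [] hb, pvGetD_set_self _ a v none ha]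

theorem pvIdx_set_ne (t : pvTbl) (a b x y : Nat) (v : Option pvDict)
    (h : x ≠ a ∨ y ≠ b) :
    pvIdx (t.set b ((t.getD b []).set a v)) x y = pvIdx t x y := by
  unfold pvIdx
  by_cases hy : y = b
  · subst hy
    have hx : x ≠ a := h.resolve_right (fun hh => hh rfl)
    by_cases hb : y < t.length
    · rw [pvGetD_set_self t y _ [] hb, pvGetD_set_ne _ a x v none (fun hh => hx hh.symm)]
    · rw [List.set_eq_of_length_le (by omega)]
  · rw [pvGetD_set_ne t b y _ [] (fun hh => hy hh.symm)]

theorem pvIdx_set_mono (t : pvTbl) (a b x y : Nat) (v : Option pvDict)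
    (hv : v.isSome) (hb : b < t.length) (ha : a < (t.getD b []).length)
    (h : (pvIdx t x y).isSome) :
    (pvIdx (t.set b ((t.getD b []).set a v)) x y).isSome := by
  by_cases hxy : x = a ∧ y = b
  · obtain ⟨h1, h2⟩ := hxy; subst h1; subst h2
    rw [pvIdx_set_self t x y v hb ha]; exact hv
  · rw [pvIdx_set_ne t a b x y v (by tauto)]; exact h

structure pvInv (grid : List (List Int)) (k : Int) (W H : Nat)
    (st : List (Int × Int)) (t : pvTbl) : Prop where
  coords : ∀ c ∈ st, ∃ a b : Nat, c = ((a : Int), (b : Int)) ∧ a < W ∧ b < H ∧ 1 ≤ a + b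
  hlen : t.length = H
  wlen : ∀ row ∈ t, row.length = W
  cells : ∀ x y : Nat, ∀ d, pvIdx t x y = some d → d = pvMk grid k x y
  origin : (pvIdx t 0 0).isSome
  sorted : st.Pairwise (fun c d => c.1 + c.2 ≤ d.1 + d.2 ∧ d.1 + d.2 ≤ c.1 + c.2 + 1)
  preds : ∀ a b : Nat, ((a : Int), (b : Int)) ∈ st →
      (a = 0 ∨ (pvIdx t (a - 1) b).isSome ∨ (((a : Int) - 1, (b : Int)) ∈ st)) ∧
      (b = 0 ∨ (pvIdx t a (b - 1)).isSome ∨ (((a : Int), (b : Int) - 1) ∈ st))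
  frontier : ∀ a b : Nat, a < W → b < H → 1 ≤ a + b →
      ((0 < a ∧ (pvIdx t (a - 1) b).isSome) ∨ (0 < b ∧ (pvIdx t a (b - 1)).isSome)) →
      (pvIdx t a b).isSome ∨ (((a : Int), (b : Int)) ∈ st)

theorem pvDict2_eq_mk (grid : List (List Int)) (k : Int) (t : pvTbl) (a b : Nat)
    (hab : 1 ≤ a + b)
    (hx : a = 0 ∨ pvIdx t (a - 1) b = some (pvMk grid k (a - 1) b))
    (hy : b = 0 ∨ pvIdx t a (b - 1) = some (pvMk grid k a (b - 1))) :
    pvDict2 grid k t (a : Int) (b : Int) = pvMk grid k a b := by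
  have hg : pvCur grid k (a : Int) (b : Int) = PySem.Int.mod ((grid.getD b []).getD a 0) k := by
    simp [pvCur, PySem.List.pyGetD_natCast]
  unfold pvDict2 pvDict1
  by_cases ha0 : a = 0
  · subst ha0
    have hb1 : b ≠ 0 := by omega
    rw [if_neg (show ¬(((0:Nat):Int) < 0 ∨ ((b:Nat):Int) - 1 < 0) by omega),
      if_pos (show ((0:Nat):Int) - 1 < 0 ∨ ((b:Nat):Int) < 0 by omega)]
    rcases hy with h | h
    · omega
    · have hbc : (((b:Nat) : Int) - 1) = ((b - 1 : Nat) : Int) := by omega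
      rw [hbc, pvGet2_natCast, h, hg, Option.getD_some]
      exact (pvMk_x0 grid k 0 b rfl hb1).symm
  · have hac : (((a:Nat) : Int) - 1) = ((a - 1 : Nat) : Int) := by omega
    rcases hx with h | h
    · omega
    · by_cases hb0 : b = 0
      · subst hb0
        rw [if_pos (show ((a:Nat):Int) < 0 ∨ (((0:Nat):Nat):Int) - 1 < 0 by omega),
          if_neg (show ¬(((a:Nat):Int) - 1 < 0 ∨ (((0:Nat)):Int) < 0) by omega),
          hac, pvGet2_natCast, h, Option.getD_some, hg]
        exact (pvMk_y0 grid k a 0 ha0 rfl).symm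
      · have hbc : (((b:Nat) : Int) - 1) = ((b - 1 : Nat) : Int) := by omega
        rw [if_neg (show ¬(((a:Nat):Int) < 0 ∨ ((b:Nat):Int) - 1 < 0) by omega),
          if_neg (show ¬(((a:Nat):Int) - 1 < 0 ∨ ((b:Nat):Int) < 0) by omega),
          hac, hbc, pvGet2_natCast, pvGet2_natCast, h, Option.getD_some, hg]
        rcases hy with h2 | h2
        · omega
        · rw [h2, Option.getD_some]
          exact (pvMk_xy grid k a b ha0 hb0).symm

theorem pvPush_mem_cases {w h : Int} {t : pvTbl} {rest : List (Int × Int)} {x y : Int}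
    {c : Int × Int} (hm : c ∈ pvPush w h t rest x y) :
    c ∈ rest ∨
    (c = (x + 1, y) ∧ ¬(x + 1 ≥ w ∨ y ≥ h ∨ (pvGet2 t (x + 1) y).isSome = true)) ∨
    (c = (x, y + 1) ∧ ¬(x ≥ w ∨ y + 1 ≥ h ∨ (pvGet2 t x (y + 1)).isSome = true)) := by
  unfold pvPush at hm
  split_ifs at hm with h1 h2 h2 <;> simp at hm <;> tauto

theorem pvPush_mem_of_mem {w h : Int} {t : pvTbl} {rest : List (Int × Int)} {x y : Int}
    {c : Int × Int} (hm : c ∈ rest) : c ∈ pvPush w h t rest x y := by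
  unfold pvPush
  split_ifs <;> simp [hm]

theorem pvPush_mem_right {w h : Int} {t : pvTbl} {rest : List (Int × Int)} {x y : Int}
    (hc : ¬(x + 1 ≥ w ∨ y ≥ h ∨ (pvGet2 t (x + 1) y).isSome = true)) :
    (x + 1, y) ∈ pvPush w h t rest x y := by
  unfold pvPush
  split_ifs <;> simp_all

theorem pvPush_mem_down {w h : Int} {t : pvTbl} {rest : List (Int × Int)} {x y : Int}
    (hc : ¬(x ≥ w ∨ y + 1 ≥ h ∨ (pvGet2 t x (y + 1)).isSome = true)) :
    (x, y + 1) ∈ pvPush w h t rest x y := by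
  unfold pvPush
  split_ifs <;> simp_all

theorem pvPush_eq_append (w h : Int) (t : pvTbl) (rest : List (Int × Int)) (x y : Int) :
    ∃ L, pvPush w h t rest x y = rest ++ L ∧
      ∀ c ∈ L, c = (x + 1, y) ∨ c = (x, y + 1) := by
  unfold pvPush
  split_ifs
  · exact ⟨[], by simp⟩
  · exact ⟨[(x, y + 1)], by simp⟩
  · exact ⟨[(x + 1, y)], by simp⟩
  · exact ⟨[(x + 1, y), (x, y + 1)], by simp [List.append_assoc]⟩

set_option maxHeartbeats 1000000 in
theorem pvInv_step (grid : List (List Int)) (k : Int) (W H : Nat) (x y : Int)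
    (rest : List (Int × Int)) (t : pvTbl)
    (h : pvInv grid k W H ((x, y) :: rest) t) :
    pvInv grid k W H
      (pvPush (W : Int) (H : Int) (pvSet2 t x y (some (pvDict2 grid k t x y))) rest x y)
      (pvSet2 t x y (some (pvDict2 grid k t x y))) := by
  obtain ⟨a, b, hc, haW, hbH, hab⟩ := h.coords (x, y) List.mem_cons_self
  rw [Prod.mk.injEq] at hc
  obtain ⟨hcx, hcy⟩ := hc
  subst hcx; subst hcy
  have hbt : b < t.length := by rw [h.hlen]; exact hbH
  have hrow : (t.getD b []).length = W := by
    have he : t.getD b [] = t[b] := List.getD_eq_getElem t [] hbt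
    rw [he]; exact h.wlen _ (List.getElem_mem _)
  have haw : a < (t.getD b []).length := by omega
  have hsort := List.pairwise_cons.mp h.sorted
  have hlev : ∀ c ∈ rest, ((a:Int) + b ≤ c.1 + c.2 ∧ c.1 + c.2 ≤ (a:Int) + b + 1) := hsort.1
  have hpred := h.preds a b List.mem_cons_self
  have hpx : a = 0 ∨ (pvIdx t (a - 1) b).isSome := by
    rcases hpred.1 with h0 | hs | hm
    · exact Or.inl h0
    · exact Or.inr hs
    · exfalso
      rcases List.mem_cons.mp hm with he | hm2
      · rw [Prod.mk.injEq] at he; omega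
      · have h2 : (a:Int) + b ≤ ((a:Int) - 1) + b := (hlev _ hm2).1
        omega
  have hpy : b = 0 ∨ (pvIdx t a (b - 1)).isSome := by
    rcases hpred.2 with h0 | hs | hm
    · exact Or.inl h0
    · exact Or.inr hs
    · exfalso
      rcases List.mem_cons.mp hm with he | hm2
      · rw [Prod.mk.injEq] at he; omega
      · have h2 : (a:Int) + b ≤ (a:Int) + ((b:Int) - 1) := (hlev _ hm2).1
        omega
  have hpx' : a = 0 ∨ pvIdx t (a - 1) b = some (pvMk grid k (a - 1) b) := by
    rcases hpx with h0 | hs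
    · exact Or.inl h0
    · obtain ⟨d, hd⟩ := Option.isSome_iff_exists.mp hs
      exact Or.inr (by rw [hd, h.cells _ _ _ hd])
  have hpy' : b = 0 ∨ pvIdx t a (b - 1) = some (pvMk grid k a (b - 1)) := by
    rcases hpy with h0 | hs
    · exact Or.inl h0
    · obtain ⟨d, hd⟩ := Option.isSome_iff_exists.mp hs
      exact Or.inr (by rw [hd, h.cells _ _ _ hd])
  have hd2 : pvDict2 grid k t (a:Int) (b:Int) = pvMk grid k a b :=
    pvDict2_eq_mk grid k t a b hab hpx' hpy'
  rw [hd2, pvSet2_natCast]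
  set T := t.set b ((t.getD b []).set a (some (pvMk grid k a b))) with hT
  have hTlen : T.length = H := by rw [hT, List.length_set]; exact h.hlen
  have hTw : ∀ row ∈ T, row.length = W := by
    intro row hr
    rcases List.mem_or_eq_of_mem_set hr with hr2 | hr2
    · exact h.wlen row hr2
    · rw [hr2, List.length_set]; exact hrow
  have hself : pvIdx T a b = some (pvMk grid k a b) := pvIdx_set_self t a b _ hbt haw
  have hne : ∀ x' y' : Nat, (x' ≠ a ∨ y' ≠ b) → pvIdx T x' y' = pvIdx t x' y' :=
    fun x' y' hxy => pvIdx_set_ne t a b x' y' _ hxy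
  have hmono : ∀ x' y' : Nat, (pvIdx t x' y').isSome → (pvIdx T x' y').isSome :=
    fun x' y' hs => pvIdx_set_mono t a b x' y' _ rfl hbt haw hs
  have hselfS : (pvIdx T a b).isSome := by rw [hself]; rfl
  obtain ⟨L, hL, hLmem⟩ := pvPush_eq_append (W:Int) (H:Int) T rest (a:Int) (b:Int)
  refine ⟨?_, hTlen, hTw, ?_, ?_, ?_, ?_, ?_⟩
  · -- coords
    intro c hm
    rcases pvPush_mem_cases hm with hr | ⟨hce, hcc⟩ | ⟨hce, hcc⟩
    · exact h.coords c (List.mem_cons_of_mem _ hr)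
    · rcases not_or.mp hcc with ⟨h1, -⟩
      refine ⟨a + 1, b, ?_, by omega, hbH, by omega⟩
      rw [hce]; push_cast; rfl
    · rcases not_or.mp hcc with ⟨-, h2⟩
      rcases not_or.mp h2 with ⟨h2, -⟩
      refine ⟨a, b + 1, ?_, haW, by omega, by omega⟩
      rw [hce]; push_cast; rfl
  · -- cells
    intro x' y' d hd
    by_cases hxy : x' = a ∧ y' = b
    · obtain ⟨h1, h2⟩ := hxy; subst h1; subst h2
      rw [hself] at hd
      injection hd with hd
      rw [← hd]
    · rw [hne x' y' (by tauto)] at hd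
      exact h.cells x' y' d hd
  · -- origin
    exact hmono 0 0 h.origin
  · -- sorted
    rw [hL, List.pairwise_append]
    refine ⟨hsort.2, ?_, ?_⟩
    · apply List.pairwise_of_forall_mem_list
      intro u hu v hv
      have hlu : u.1 + u.2 = (a:Int) + b + 1 := by
        rcases hLmem u hu with he | he <;> rw [he] <;> dsimp <;> ring
      have hlv : v.1 + v.2 = (a:Int) + b + 1 := by
        rcases hLmem v hv with he | he <;> rw [he] <;> dsimp <;> ring
      constructor <;> omega
    · intro u hu v hv
      have hlu := hlev u hu
      have hlv : v.1 + v.2 = (a:Int) + b + 1 := by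
        rcases hLmem v hv with he | he <;> rw [he] <;> dsimp <;> ring
      constructor <;> omega
  · -- preds
    intro a' b' hm'
    rcases pvPush_mem_cases hm' with hr | ⟨hce, hcc⟩ | ⟨hce, hcc⟩
    · obtain ⟨hp1, hp2⟩ := h.preds a' b' (List.mem_cons_of_mem _ hr)
      constructor
      · rcases hp1 with h0 | hs | hmm
        · exact Or.inl h0
        · exact Or.inr (Or.inl (hmono _ _ hs))
        · rcases List.mem_cons.mp hmm with he | hm3
          · rw [Prod.mk.injEq] at he
            have hn : a' - 1 = a ∧ b' = b := by omega
            right; left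
            rw [hn.1, hn.2, hself]; rfl
          · exact Or.inr (Or.inr (pvPush_mem_of_mem hm3))
      · rcases hp2 with h0 | hs | hmm
        · exact Or.inl h0
        · exact Or.inr (Or.inl (hmono _ _ hs))
        · rcases List.mem_cons.mp hmm with he | hm3
          · rw [Prod.mk.injEq] at he
            have hn : a' = a ∧ b' - 1 = b := by omega
            right; left
            rw [hn.1, hn.2, hself]; rfl
          · exact Or.inr (Or.inr (pvPush_mem_of_mem hm3))
    · -- the pushed right child (a+1, b)
      rw [Prod.mk.injEq] at hce
      have hn : a' = a + 1 ∧ b' = b := by omega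
      rw [hn.1, hn.2]
      rcases not_or.mp hcc with ⟨hb1, hb2⟩
      rcases not_or.mp hb2 with ⟨hb2, -⟩
      constructor
      · right; left
        rw [show a + 1 - 1 = a from by omega, hself]; rfl
      · by_cases hb0 : b = 0
        · exact Or.inl hb0
        · have hq := h.frontier (a + 1) (b - 1) (by omega) (by omega) (by omega)
            (Or.inl ⟨by omega, by rw [show a + 1 - 1 = a from by omega]; exact hpy.resolve_left hb0⟩)
          rcases hq with hq | hq
          · exact Or.inr (Or.inl (hmono _ _ hq))
          · rcases List.mem_cons.mp hq with he | hm3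
            · rw [Prod.mk.injEq] at he; omega
            · right; right
              have hcast : (((b:Nat):Int) - 1) = ((b - 1 : Nat) : Int) := by omega
              rw [hcast]
              exact pvPush_mem_of_mem hm3
    · -- the pushed down child (a, b+1)
      rw [Prod.mk.injEq] at hce
      have hn : a' = a ∧ b' = b + 1 := by omega
      rw [hn.1, hn.2]
      rcases not_or.mp hcc with ⟨hb1, hb2⟩
      rcases not_or.mp hb2 with ⟨hb2, -⟩
      constructor
      · by_cases ha0 : a = 0
        · exact Or.inl ha0
        · have hq := h.frontier (a - 1) (b + 1) (by omega) (by omega) (by omega)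
            (Or.inr ⟨by omega, by rw [show b + 1 - 1 = b from by omega]; exact hpx.resolve_left ha0⟩)
          rcases hq with hq | hq
          · exact Or.inr (Or.inl (hmono _ _ hq))
          · rcases List.mem_cons.mp hq with he | hm3
            · rw [Prod.mk.injEq] at he; omega
            · right; right
              have hcast : (((a:Nat):Int) - 1) = ((a - 1 : Nat) : Int) := by omega
              rw [hcast]
              exact pvPush_mem_of_mem hm3
      · right; left
        rw [show b + 1 - 1 = b from by omega, hself]; rfl
  · -- frontier
    intro a' b' haW' hbH' hab' hsome
    rcases hsome with ⟨hpos, hs⟩ | ⟨hpos, hs⟩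
    · by_cases hpe : a' - 1 = a ∧ b' = b
      · have ha' : a' = a + 1 := by omega
        by_cases hC : ((a:Int) + 1 ≥ (W:Int) ∨ (b:Int) ≥ (H:Int) ∨ (pvGet2 T ((a:Int) + 1) (b:Int)).isSome = true)
        · left
          rcases hC with h1 | h1 | h1
          · omega
          · omega
          · rw [show ((a:Int) + 1) = ((a + 1 : Nat) : Int) from by omega, pvGet2_natCast] at h1
            rw [ha', hpe.2]
            exact h1
        · right
          have hmem := pvPush_mem_right (w := (W:Int)) (h := (H:Int)) (t := T) (rest := rest)
            (x := (a:Int)) (y := (b:Int)) hC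
          rw [show ((a':Nat):Int) = (a:Int) + 1 from by omega,
            show ((b':Nat):Int) = (b:Int) from by omega]
          exact hmem
      · have hst : (pvIdx t (a' - 1) b').isSome := by
          rw [← hne _ _ (by tauto)]; exact hs
        rcases h.frontier a' b' haW' hbH' hab' (Or.inl ⟨hpos, hst⟩) with hq | hq
        · exact Or.inl (hmono _ _ hq)
        · rcases List.mem_cons.mp hq with he | hm3
          · rw [Prod.mk.injEq] at he
            have hn : a' = a ∧ b' = b := by omega
            left; rw [hn.1, hn.2, hself]; rfl
          · exact Or.inr (pvPush_mem_of_mem hm3)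
    · by_cases hpe : a' = a ∧ b' - 1 = b
      · have hb' : b' = b + 1 := by omega
        by_cases hC : ((a:Int) ≥ (W:Int) ∨ (b:Int) + 1 ≥ (H:Int) ∨ (pvGet2 T (a:Int) ((b:Int) + 1)).isSome = true)
        · left
          rcases hC with h1 | h1 | h1
          · omega
          · omega
          · rw [show ((b:Int) + 1) = ((b + 1 : Nat) : Int) from by omega, pvGet2_natCast] at h1
            rw [hpe.1, hb']
            exact h1
        · right
          have hmem := pvPush_mem_down (w := (W:Int)) (h := (H:Int)) (t := T) (rest := rest)
            (x := (a:Int)) (y := (b:Int)) hC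
          rw [show ((a':Nat):Int) = (a:Int) from by omega,
            show ((b':Nat):Int) = (b:Int) + 1 from by omega]
          exact hmem
      · have hst : (pvIdx t a' (b' - 1)).isSome := by
          rw [← hne _ _ (by tauto)]; exact hs
        rcases h.frontier a' b' haW' hbH' hab' (Or.inr ⟨hpos, hst⟩) with hq | hq
        · exact Or.inl (hmono _ _ hq)
        · rcases List.mem_cons.mp hq with he | hm3
          · rw [Prod.mk.injEq] at he
            have hn : a' = a ∧ b' = b := by omega
            left; rw [hn.1, hn.2, hself]; rfl
          · exact Or.inr (pvPush_mem_of_mem hm3)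

theorem pvPyGetD_cases {α : Type} (xs : List α) (i : Int) (d : α) :
    PySem.List.pyGetD xs i d = d ∨ PySem.List.pyGetD xs i d ∈ xs := by
  unfold PySem.List.pyGetD
  rcases h : PySem.List.pyGet? xs i with _ | v
  · simp
  · right
    simp only [Option.getD_some]
    exact PySem.List.mem_of_pyGet?_eq_some _ h

theorem pvGet2_replicate (W H : Nat) (x y : Int) :
    pvGet2 (List.replicate H (List.replicate W (none : Option pvDict))) x y = none := by
  unfold pvGet2
  rcases pvPyGetD_cases (List.replicate H (List.replicate W (none : Option pvDict))) y [] with h | h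
  · rw [h]
    rcases pvPyGetD_cases ([] : List (Option pvDict)) x none with h2 | h2
    · exact h2
    · cases h2
  · have hrow := List.eq_of_mem_replicate h
    rw [hrow]
    rcases pvPyGetD_cases (List.replicate W (none : Option pvDict)) x none with h2 | h2
    · exact h2
    · exact List.eq_of_mem_replicate h2

theorem pvIdx_replicate (W H : Nat) (x y : Nat) :
    pvIdx (List.replicate H (List.replicate W (none : Option pvDict))) x y = none := by
  unfold pvIdx
  rw [show (List.replicate H (List.replicate W (none : Option pvDict))).getD y []
      = if y < H then List.replicate W none else [] from by
    rw [List.getD_eq_getElem?_getD, List.getElem?_replicate]; split_ifs <;> simp]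
  split_ifs
  · rw [List.getD_eq_getElem?_getD, List.getElem?_replicate]
    split_ifs <;> simp
  · simp

theorem pvLoop_inv (grid : List (List Int)) (k : Int) (W H : Nat) :
    ∀ (st : List (Int × Int)) (t : pvTbl), pvInv grid k W H st t →
      pvInv grid k W H [] (pvLoop grid k (W:Int) (H:Int) st t) := by
  intro st t
  induction st, t using pvLoop.induct grid k (W:Int) (H:Int) with
  | case1 t =>
    intro h
    rw [pvLoop]
    exact h
  | case2 x y rest t t' ih =>
    intro h
    rw [pvLoop]
    exact ih (pvInv_step grid k W H x y rest t h)

theorem pvFull (grid : List (List Int)) (k : Int) (W H : Nat) (t : pvTbl)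
    (hI : pvInv grid k W H [] t) :
    ∀ n a b : Nat, a + b = n → a < W → b < H → (pvIdx t a b).isSome := by
  intro n
  induction n using Nat.strong_induction_on with
  | _ n ih =>
  intro a b hab haW hbH
  by_cases h0 : a = 0 ∧ b = 0
  · rw [h0.1, h0.2]; exact hI.origin
  · have hpred : ((0 < a ∧ (pvIdx t (a - 1) b).isSome) ∨ (0 < b ∧ (pvIdx t a (b - 1)).isSome)) := by
      by_cases ha : a = 0
      · have hb : 0 < b := by omega
        exact Or.inr ⟨hb, ih (n - 1) (by omega) a (b - 1) (by omega) haW (by omega)⟩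
      · exact Or.inl ⟨by omega, ih (n - 1) (by omega) (a - 1) b (by omega) (by omega) hbH⟩
    rcases hI.frontier a b haW hbH (by omega) hpred with hq | hq
    · exact hq
    · cases hq

set_option maxHeartbeats 1000000 in
theorem pvA_eq (grid : List (List Int)) (k : Int)
    (hg : grid ≠ []) (hw : 0 < (grid.getD 0 []).length) :
    numberOfPathsStack grid k
      = (pvMk grid k ((grid.getD 0 []).length - 1) (grid.length - 1)).getD 0 0 := by
  have hH : 0 < grid.length := List.length_pos_iff.mpr hg
  unfold numberOfPathsStack
  simp only [PySem.List.pyGetD_zero, PySem.List.len_eq]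
  set W := (grid.getD 0 []).length with hWdef
  set H := grid.length with hHdef
  set t0 : pvTbl := List.replicate H (List.replicate W none) with ht0
  have hT1 : pvSet2 t0 0 0 (some (PySem.Dict.insert PySem.Dict.empty
      (PySem.Int.mod ((grid.getD 0 []).getD 0 0) k) 1))
      = t0.set 0 ((t0.getD 0 []).set 0 (some (pvMk grid k 0 0))) := by
    rw [← pvMk_base]
    have := pvSet2_natCast t0 0 0 (some (pvMk grid k 0 0))
    simpa using this
  rw [hT1]
  set t1 : pvTbl := t0.set 0 ((t0.getD 0 []).set 0 (some (pvMk grid k 0 0))) with ht1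
  -- basic facts about the initial table
  have ht0row : t0.getD 0 [] = List.replicate W none := by
    rw [ht0, List.getD_eq_getElem?_getD, List.getElem?_replicate, if_pos hH, Option.getD_some]
  have ht1len : t1.length = H := by rw [ht1, List.length_set, ht0, List.length_replicate]
  have hIdxSelf : pvIdx t1 0 0 = some (pvMk grid k 0 0) := by
    rw [ht1]
    exact pvIdx_set_self t0 0 0 _ (by rw [ht0, List.length_replicate]; exact hH)
      (by rw [ht0row, List.length_replicate]; exact hw)
  have hIdxNe : ∀ x y : Nat, (x ≠ 0 ∨ y ≠ 0) → pvIdx t1 x y = none := by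
    intro x y hxy
    rw [ht1, pvIdx_set_ne t0 0 0 x y _ hxy, ht0]
    exact pvIdx_replicate W H x y
  have hOnly : ∀ x y : Nat, (pvIdx t1 x y).isSome → (x = 0 ∧ y = 0) := by
    intro x y hs
    by_contra hc
    rw [hIdxNe x y (by tauto)] at hs
    cases hs
  -- the initial invariant
  have hInv : pvInv grid k W H
      ((if (1:Int) ≥ (W:Int) ∨ (0:Int) ≥ (H:Int) ∨ (pvGet2 t0 1 0).isSome then [] else [((1:Int),(0:Int))]) ++
       (if (0:Int) ≥ (W:Int) ∨ (1:Int) ≥ (H:Int) ∨ (pvGet2 t0 0 1).isSome then [] else [((0:Int),(1:Int))])) t1 := by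
    have hmemS : ∀ c, c ∈ ((if (1:Int) ≥ (W:Int) ∨ (0:Int) ≥ (H:Int) ∨ (pvGet2 t0 1 0).isSome then [] else [((1:Int),(0:Int))]) ++
       (if (0:Int) ≥ (W:Int) ∨ (1:Int) ≥ (H:Int) ∨ (pvGet2 t0 0 1).isSome then [] else [((0:Int),(1:Int))])) →
        (c = ((1:Int),(0:Int)) ∧ 1 < W) ∨ (c = ((0:Int),(1:Int)) ∧ 1 < H) := by
      intro c hc
      rcases List.mem_append.mp hc with hm | hm <;> split_ifs at hm with hcond <;> simp at hm
      · subst hm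
        left
        refine ⟨rfl, ?_⟩
        rcases not_or.mp hcond with ⟨h1, -⟩
        omega
      · subst hm
        right
        refine ⟨rfl, ?_⟩
        rcases not_or.mp hcond with ⟨-, h2⟩
        rcases not_or.mp h2 with ⟨h2, -⟩
        omega
    refine ⟨?_, ht1len, ?_, ?_, ?_, ?_, ?_, ?_⟩
    · intro c hc
      rcases hmemS c hc with ⟨he, hlt⟩ | ⟨he, hlt⟩
      · exact ⟨1, 0, by rw [he]; push_cast; rfl, hlt, hH, by omega⟩
      · exact ⟨0, 1, by rw [he]; push_cast; rfl, hw, hlt, by omega⟩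
    · intro row hr
      rw [ht1] at hr
      rcases List.mem_or_eq_of_mem_set hr with hr2 | hr2
      · rw [ht0] at hr2
        rw [List.eq_of_mem_replicate hr2, List.length_replicate]
      · rw [hr2, List.length_set, ht0row, List.length_replicate]
    · intro x y d hd
      have h00 := hOnly x y (by rw [hd]; rfl)
      rw [h00.1, h00.2] at hd ⊢
      rw [hIdxSelf] at hd
      injection hd with hd
      rw [← hd]
    · rw [hIdxSelf]; rfl
    · apply List.pairwise_of_forall_mem_list
      intro u hu v hv
      have hlu : u.1 + u.2 = 1 := by
        rcases hmemS u hu with ⟨he, -⟩ | ⟨he, -⟩ <;> rw [he] <;> dsimp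
      have hlv : v.1 + v.2 = 1 := by
        rcases hmemS v hv with ⟨he, -⟩ | ⟨he, -⟩ <;> rw [he] <;> dsimp
      constructor <;> omega
    · intro a b hm
      rcases hmemS _ hm with ⟨he, -⟩ | ⟨he, -⟩ <;> rw [Prod.mk.injEq] at he
      · have hab : a = 1 ∧ b = 0 := by omega
        constructor
        · right; left
          rw [show a - 1 = 0 from by omega, hab.2, hIdxSelf]; rfl
        · exact Or.inl hab.2
      · have hab : a = 0 ∧ b = 1 := by omega
        constructor
        · exact Or.inl hab.1
        · right; left
          rw [show b - 1 = 0 from by omega, hab.1, hIdxSelf]; rfl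
    · intro a b haW hbH hab hpred
      rcases hpred with ⟨hpos, hs⟩ | ⟨hpos, hs⟩
      · have h00 := hOnly _ _ hs
        have hab' : a = 1 ∧ b = 0 := by omega
        right
        apply List.mem_append_left
        rw [if_neg (not_or.mpr ⟨by omega, not_or.mpr ⟨by omega, by
          rw [ht0, pvGet2_replicate]; simp⟩⟩)]
        rw [hab'.1, hab'.2]
        simp
      · have h00 := hOnly _ _ hs
        have hab' : a = 0 ∧ b = 1 := by omega
        right
        apply List.mem_append_right
        rw [if_neg (not_or.mpr ⟨by omega, not_or.mpr ⟨by omega, by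
          rw [ht0, pvGet2_replicate]; simp⟩⟩)]
        rw [hab'.1, hab'.2]
        simp
  -- run the loop
  have hFin := pvLoop_inv grid k W H _ _ hInv
  set F := pvLoop grid k (W:Int) (H:Int)
      ((if (1:Int) ≥ (W:Int) ∨ (0:Int) ≥ (H:Int) ∨ (pvGet2 t0 1 0).isSome then [] else [((1:Int),(0:Int))]) ++
       (if (0:Int) ≥ (W:Int) ∨ (1:Int) ≥ (H:Int) ∨ (pvGet2 t0 0 1).isSome then [] else [((0:Int),(1:Int))])) t1 with hF
  have hFlen : F.length = H := hFin.hlen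
  have hFne : F ≠ [] := by
    intro hc; rw [hc] at hFlen; simp at hFlen; omega
  have hSome := pvFull grid k W H F hFin ((W - 1) + (H - 1)) (W - 1) (H - 1) rfl (by omega) (by omega)
  obtain ⟨d, hd⟩ := Option.isSome_iff_exists.mp hSome
  have hdval : d = pvMk grid k (W - 1) (H - 1) := hFin.cells _ _ _ hd
  -- the final 2D read path_count[-1][-1]
  have hlast1 : PySem.List.pyGetD F (-1) [] = F.getD (H - 1) [] := by
    rw [PySem.List.pyGetD_neg_one F [] hFne, List.getLast_eq_getElem,
      List.getD_eq_getElem F [] (by omega)]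
    congr 1
    omega
  have hrowmem : F.getD (H - 1) [] ∈ F := by
    rw [List.getD_eq_getElem F [] (by omega)]
    exact List.getElem_mem _
  have hrowlen : (F.getD (H - 1) []).length = W := hFin.wlen _ hrowmem
  have hrowne : F.getD (H - 1) [] ≠ [] := by
    intro hc; rw [hc] at hrowlen; simp at hrowlen; omega
  have hlast2 : PySem.List.pyGetD (F.getD (H - 1) []) (-1) none = pvIdx F (W - 1) (H - 1) := by
    rw [PySem.List.pyGetD_neg_one _ none hrowne, List.getLast_eq_getElem]
    unfold pvIdx
    rw [List.getD_eq_getElem _ none (by omega)]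
    congr 1
    omega
  rw [hlast1, hlast2, hd, hdval]

-- ---------- B: the row-major pass builds exactly the dicts pvMk ----------

def pvRowM (grid : List (List Int)) (k : Int) (W i : Nat) : List pvDict :=
  (List.range W).map (fun j => pvMk grid k j i)

theorem pvGetD_map_range {α : Type} (f : Nat → α) (n j : Nat) (d : α) (h : j < n) :
    ((List.range n).map f).getD j d = f j := by
  rw [List.getD_eq_getElem?_getD]
  simp [List.getElem?_map, List.getElem?_range h]

theorem pvBInner_step (grid : List (List Int)) (k : Int) (W : Nat) (i j : Nat) (hj : j < W)
    (prev : List pvDict) (hprev : 0 < i → prev = pvRowM grid k W (i - 1)) :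
    pvBInner grid k prev (i : Int) ((List.range j).map (fun j' => pvMk grid k j' i)) (j : Int)
      = (List.range j).map (fun j' => pvMk grid k j' i) ++ [pvMk grid k j i] := by
  have hgacc : PySem.Int.mod (PySem.List.pyGetD (PySem.List.pyGetD grid (i:Int) []) (j:Int) 0) k
      = PySem.Int.mod ((grid.getD i []).getD j 0) k := by
    simp [PySem.List.pyGetD_natCast]
  have hup : 0 < i → PySem.List.pyGetD prev (j:Int) PySem.Dict.empty = pvMk grid k j (i - 1) := by
    intro hi
    rw [PySem.List.pyGetD_natCast, hprev hi, pvRowM, pvGetD_map_range _ W j _ hj]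
  simp only [pvBInner]
  congr 1
  congr 1
  by_cases hbase : i = 0 ∧ j = 0
  · rw [if_pos (show ((i:Nat):Int) = 0 ∧ ((j:Nat):Int) = 0 by omega), hgacc,
      hbase.1, hbase.2, pvMk_base]
  · rw [if_neg (show ¬(((i:Nat):Int) = 0 ∧ ((j:Nat):Int) = 0) by omega)]
    by_cases hi0 : i = 0
    · have hj0 : j ≠ 0 := fun hc => hbase ⟨hi0, hc⟩
      rw [if_neg (show ¬((0:Int) < ((i:Nat):Int)) by omega),
        if_pos (show (0:Int) < ((j:Nat):Int) by omega),
        show ((j:Int) - 1) = ((j - 1 : Nat) : Int) from by omega,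
        PySem.List.pyGetD_natCast _ (j - 1) PySem.Dict.empty,
        pvGetD_map_range _ j (j - 1) _ (by omega), hgacc,
        pvMk_y0 grid k j i hj0 hi0, hi0]
    · by_cases hj0 : j = 0
      · rw [if_pos (show (0:Int) < ((i:Nat):Int) by omega),
          if_neg (show ¬((0:Int) < ((j:Nat):Int)) by omega),
          hup (by omega), hgacc, pvMk_x0 grid k j i hj0 hi0]
      · rw [if_pos (show (0:Int) < ((i:Nat):Int) by omega),
          if_pos (show (0:Int) < ((j:Nat):Int) by omega),
          hup (by omega),
          show ((j:Int) - 1) = ((j - 1 : Nat) : Int) from by omega,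
          PySem.List.pyGetD_natCast _ (j - 1) PySem.Dict.empty,
          pvGetD_map_range _ j (j - 1) _ (by omega), hgacc,
          pvMk_xy grid k j i hj0 hi0]

theorem pvB_inner_fold (grid : List (List Int)) (k : Int) (W : Nat) (i : Nat)
    (prev : List pvDict) (hprev : 0 < i → prev = pvRowM grid k W (i - 1)) :
    ∀ jn, jn ≤ W →
      ((List.range jn).foldl
        (fun row (jj : Nat) => pvBInner grid k prev (i:Int) row (jj:Int)) [])
        = (List.range jn).map (fun j' => pvMk grid k j' i) := by
  intro jn
  induction jn with
  | zero => intro _; simp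
  | succ n ihn =>
    intro hle
    rw [List.range_succ, List.foldl_append, ihn (by omega), List.foldl_cons, List.foldl_nil,
      pvBInner_step grid k W i n (by omega) prev hprev, List.map_append]
    rfl

theorem pvB_outer_fold (grid : List (List Int)) (k : Int) (W H : Nat) :
    ∀ i0, i0 ≤ H →
      ((List.range i0).foldl (fun prev (ii : Nat) =>
        (PySem.List.pyRange 0 (W:Int)).foldl (pvBInner grid k prev (ii:Int)) []) [])
      = if i0 = 0 then [] else pvRowM grid k W (i0 - 1) := by
  intro i0
  induction i0 with
  | zero => intro _; simp
  | succ n ihn =>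
    intro hle
    rw [List.range_succ, List.foldl_append, ihn (by omega), List.foldl_cons, List.foldl_nil,
      PySem.List.pyRange_zero_natCast W, List.foldl_map]
    by_cases hn0 : n = 0
    · subst hn0
      rw [if_pos rfl, pvB_inner_fold grid k W 0 [] (by omega) W (le_refl W),
        if_neg (Nat.succ_ne_zero 0)]
      rfl
    · rw [if_neg hn0,
        pvB_inner_fold grid k W n (pvRowM grid k W (n - 1)) (fun _ => rfl) W (le_refl W),
        if_neg (Nat.succ_ne_zero n)]
      rfl

theorem pvB_eq (grid : List (List Int)) (k : Int)
    (hg : grid ≠ []) (hw : 0 < (grid.getD 0 []).length) :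
    numberOfPathsStack_alt grid k
      = (pvMk grid k ((grid.getD 0 []).length - 1) (grid.length - 1)).getD 0 0 := by
  have hH : 0 < grid.length := List.length_pos_iff.mpr hg
  unfold numberOfPathsStack_alt
  simp only [PySem.List.pyGetD_zero, PySem.List.len_eq]
  set W := (grid.getD 0 []).length with hWdef
  set H := grid.length with hHdef
  rw [PySem.List.pyRange_zero_natCast H, List.foldl_map]
  rw [pvB_outer_fold grid k W H H (le_refl H)]
  rw [if_neg (by omega)]
  have hne : pvRowM grid k W (H - 1) ≠ [] := by
    intro hc
    have := congrArg List.length hc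
    simp [pvRowM] at this
    omega
  have hlast : PySem.List.pyGetD (pvRowM grid k W (H - 1)) (-1) PySem.Dict.empty
      = pvMk grid k (W - 1) (H - 1) := by
    rw [PySem.List.pyGetD_neg_one _ _ hne, List.getLast_eq_getElem]
    simp only [pvRowM, List.length_map, List.length_range]
    rw [List.getElem_map, List.getElem_range]
  rw [hlast]

-- ===== VERDICT (by name: the statement is the Claim_ definition above) =====
theorem numberOfPathsStack_spec : Claim_equal_numberOfPathsStack := by
  intro grid k hDom hPre
  obtain ⟨hg, hw, -, -⟩ := hPre
  unfold Spec_numberOfPathsStack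
  rw [pvA_eq grid k hg hw, pvB_eq grid k hg hw]
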